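-- pv_equiv track=rewrite | github.com/Eduarda2aragao/Intelig-ncia-artificial | EXERCÍCIO 2 CSP_BUSCA/02.py | valido
-- ===== SOURCE A (Python) =====
-- def valido(estado):
--     ocupacao = {}
--     for monitor, (sala, horario) in estado.items():
--         # Regra 2: Não pode haver dois monitores na mesma sala/horário
--         if (sala, horario) in ocupacao:
--             return False
--         ocupacao[(sala, horario)] = monitor
--
--         # Regra 3: M1 não pode atuar às 16h
--         if monitor == "M1" and horario == "16h":
--             return False
--
--         # Regra 4: M3 só pode atuar no Lab2
--         if monitor == "M3" and sala != "Lab2":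
--             return False
--
--     return True
-- ===== SOURCE B (Python) =====
-- def valido(estado):
--     # Bulk two-pass check: uniqueness of (sala, horario) pairs via set size,
--     # then rules 3 and 4 in a single all(...) pass.
--     pares = list(estado.values())
--     if len(pares) != len(set(pares)):
--         return False
--     return all(not (monitor == "M1" and horario == "16h")
--                and not (monitor == "M3" and sala != "Lab2")
--                for monitor, (sala, horario) in estado.items())
-- ===== Notes on version B (the rewrite author's own statement) =====
-- stated objective: simpler
-- what changed: Replaces the single early-exit scan that builds an occupancy dict with per-entry membership tests by a bulk decomposition: collect all (sala, horario) pairs and compare len(pairs) with len(set(pairs)) for Rule 2, then check Rules 3-4 in one all(...) pass.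
import Mathlib
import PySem

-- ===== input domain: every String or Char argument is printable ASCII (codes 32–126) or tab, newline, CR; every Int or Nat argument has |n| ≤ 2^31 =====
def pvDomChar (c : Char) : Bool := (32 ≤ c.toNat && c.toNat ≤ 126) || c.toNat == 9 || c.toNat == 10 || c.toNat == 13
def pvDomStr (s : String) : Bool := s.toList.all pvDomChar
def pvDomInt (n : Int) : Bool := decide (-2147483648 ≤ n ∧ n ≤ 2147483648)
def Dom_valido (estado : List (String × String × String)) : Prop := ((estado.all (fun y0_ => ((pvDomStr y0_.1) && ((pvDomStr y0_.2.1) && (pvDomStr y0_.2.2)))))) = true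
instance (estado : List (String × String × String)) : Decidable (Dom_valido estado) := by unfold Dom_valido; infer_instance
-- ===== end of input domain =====

-- B changes the decomposition only (bulk set-size uniqueness check + one all-pass instead of
-- an early-exit scan with an occupancy dict); same O(n) cost, return value proved identical.

-- ===== PORT A =====
def validoAux : List (String × String × String) → PySem.Dict (String × String) String → Bool
  | [], _ => true
  | (monitor, sala, horario) :: rest, ocupacao =>
    if ocupacao.contains (sala, horario) then false
    else
      let ocupacao' := ocupacao.insert (sala, horario) monitor
      if monitor == "M1" && horario == "16h" then false
      else if monitor == "M3" && sala != "Lab2" then false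
      else validoAux rest ocupacao'

def valido (estado : List (String × String × String)) : Bool :=
  validoAux estado PySem.Dict.empty

-- ===== PORT B =====
def valido_alt (estado : List (String × String × String)) : Bool :=
  let pares := estado.map (fun t => (t.2.1, t.2.2))
  if pares.length ≠ (PySem.Set.ofList pares).length then false
  else
    estado.all (fun t =>
      !(t.1 == "M1" && t.2.2 == "16h") && !(t.1 == "M3" && t.2.1 != "Lab2"))

-- ===== PRECONDITION & SPEC =====
def Spec_valido (estado : List (String × String × String)) (out : Bool) : Prop := out = valido_alt estado
instance (estado : List (String × String × String)) (out : Bool) : Decidable (Spec_valido estado out) := by unfold Spec_valido; infer_instance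

-- ===== CLAIM (what is proved, stated in full; the proofs are below) =====
def Claim_equal_valido : Prop := ∀ (estado : List (String × String × String)), Dom_valido estado → Spec_valido estado (valido estado)

-- ===== LEMMAS AND PROOFS =====

-- a fold of Set.add cannot shrink the accumulator and grows by at most the list length
theorem foldl_add_len_le {α : Type} [BEq α] [LawfulBEq α] (xs : List α) (s : PySem.Set α) :
    (xs.foldl PySem.Set.add s).length ≤ s.length + xs.length := by
  induction xs generalizing s with
  | nil => simp
  | cons x xs ih =>
    simp only [List.foldl_cons, List.length_cons]
    calc (xs.foldl PySem.Set.add (PySem.Set.add s x)).length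
        ≤ (PySem.Set.add s x).length + xs.length := ih _
      _ ≤ s.length + (xs.length + 1) := by
          rw [PySem.Set.add_eq_ite]; split
          · simp
          · simp; omega

theorem foldl_add_len_lt {α : Type} [BEq α] [LawfulBEq α] (xs : List α) (s : PySem.Set α)
    (h : ¬ xs.Nodup ∨ ∃ x ∈ xs, x ∈ s) :
    (xs.foldl PySem.Set.add s).length < s.length + xs.length := by
  induction xs generalizing s with
  | nil =>
    rcases h with h | ⟨x, hx, _⟩
    · exact absurd List.nodup_nil h
    · simp at hx
  | cons x xs ih =>
    simp only [List.foldl_cons, List.length_cons]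
    by_cases hxs : x ∈ s
    · have hadd : PySem.Set.add s x = s := by rw [PySem.Set.add_eq_ite]; simp [hxs]
      rw [hadd]
      have := foldl_add_len_le xs s
      omega
    · have hadd : PySem.Set.add s x = s ++ [x] := by rw [PySem.Set.add_eq_ite]; simp [hxs]
      rw [hadd]
      have hlen : (s ++ [x]).length = s.length + 1 := by simp
      rcases h with h | ⟨y, hy, hys⟩
      · rw [List.nodup_cons, not_and_or, not_not] at h
        rcases h with hmem | hnd
        · have := ih (s ++ [x]) (Or.inr ⟨x, hmem, by simp⟩)
          omega
        · have := ih (s ++ [x]) (Or.inl hnd)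
          omega
      · rcases List.mem_cons.mp hy with rfl | hy'
        · exact absurd hys hxs
        · have := ih (s ++ [x]) (Or.inr ⟨y, hy', by simp [hys]⟩)
          omega

theorem ofList_len_eq_iff {α : Type} [BEq α] [LawfulBEq α] (xs : List α) :
    xs.length = (PySem.Set.ofList xs).length ↔ xs.Nodup := by
  constructor
  · intro h
    by_contra hnd
    have := foldl_add_len_lt xs ([] : PySem.Set α) (Or.inl hnd)
    rw [PySem.Set.ofList_eq_foldl] at h
    simp at this
    omega
  · intro h
    rw [PySem.Set.ofList_eq_self_of_nodup xs h]

-- characterisation of A's early-exit scan as a conjunction of bulk conditions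
theorem validoAux_eq (l : List (String × String × String))
    (oc : PySem.Dict (String × String) String) :
    validoAux l oc =
      (decide (l.map (fun t => (t.2.1, t.2.2))).Nodup
        && l.all (fun t => !oc.contains (t.2.1, t.2.2))
        && l.all (fun t =>
            !(t.1 == "M1" && t.2.2 == "16h") && !(t.1 == "M3" && t.2.1 != "Lab2"))) := by
  induction l generalizing oc with
  | nil => simp [validoAux]
  | cons p rest ih =>
    obtain ⟨m, s, h⟩ := p
    simp only [validoAux, List.map_cons, List.all_cons]
    by_cases hc : oc.contains (s, h) = true
    · simp [hc]
    · rw [if_neg (by simp [hc])]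
      by_cases h1 : (m == "M1" && h == "16h") = true
      · simp [h1, hc]
      · rw [if_neg (by simp [h1])]
        by_cases h2 : (m == "M3" && s != "Lab2") = true
        · simp [h1, h2, hc]
        · rw [if_neg (by simp [h2]), ih]
          by_cases hm : (s, h) ∈ rest.map (fun t => (t.2.1, t.2.2))
          · -- head pair duplicated later: both sides are false
            obtain ⟨t, ht, hts⟩ := List.mem_map.mp hm
            have hfa : (rest.all fun t =>
                !(PySem.Dict.insert oc (s, h) m).contains (t.2.1, t.2.2)) = false := by
              simp only [List.all_eq_false]
              exact ⟨t, ht, by simp [hts]⟩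
            rw [hfa]
            simp only [Bool.and_false, Bool.false_and, List.nodup_cons]
            rw [decide_eq_false (by simp [hm])]
            rfl
          · -- head pair fresh: drop it from both sides
            have hall : (rest.all fun t =>
                !(PySem.Dict.insert oc (s, h) m).contains (t.2.1, t.2.2))
                = (rest.all fun t => !oc.contains (t.2.1, t.2.2)) := by
              rw [Bool.eq_iff_iff]; simp only [List.all_eq_true]
              constructor
              · intro ha t ht
                have := ha t ht
                simp only [PySem.Dict.contains_insert, Bool.not_eq_true', Bool.or_eq_false_iff] at this
                simp [this.2]
              · intro ha t ht
                have h1 := ha t ht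
                have h2 : ((t.2.1, t.2.2) == ((s, h) : String × String)) = false := by
                  simp only [beq_eq_false_iff_ne, ne_eq]
                  intro heq
                  exact hm (List.mem_map.mpr ⟨t, ht, heq⟩)
                simp only [PySem.Dict.contains_insert, h2, Bool.false_or]
                exact h1
            rw [hall]
            simp [List.nodup_cons, hm, hc, h1, h2]

-- ===== VERDICT (by name: the statement is the Claim_ definition above) =====
theorem valido_spec : Claim_equal_valido := by
  intro estado _
  unfold Spec_valido valido valido_alt
  rw [validoAux_eq]
  have hempty : (estado.all fun t =>
      !(PySem.Dict.empty : PySem.Dict (String × String) String).contains (t.2.1, t.2.2)) = true := by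
    simp [List.all_eq_true, PySem.Dict.contains_empty]
  rw [hempty]
  by_cases hnd : (estado.map (fun t => (t.2.1, t.2.2))).Nodup
  · rw [if_neg (by simpa using (ofList_len_eq_iff _).mpr hnd)]
    simp [hnd]
  · rw [if_pos (by intro hlen; exact hnd ((ofList_len_eq_iff _).mp hlen))]
    simp [hnd]
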